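-- pv_equiv track=rewrite | github.com/bobbyluig/eclipse | src/agility/pololu/usc.py | normalSpeedToExponentialSpeed
-- ===== SOURCE A (Python) =====
-- def normalSpeedToExponentialSpeed(normalSpeed):
--     mantissa = normalSpeed
--     exponent = 0
--
--     while True:
--         if mantissa < 32:
--             return exponent + (mantissa << 3)
--
--         if exponent == 7:
--             return 0xFF
--
--         exponent += 1
--         mantissa >>= 1
-- ===== SOURCE B (Python) =====
-- def normalSpeedToExponentialSpeed(normalSpeed):
--     if normalSpeed < 32:
--         return normalSpeed << 3
--     exp = normalSpeed.bit_length() - 5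
--     if exp > 7:
--         return 0xFF
--     return exp + ((normalSpeed >> exp) << 3)
-- ===== Notes on version B (the rewrite author's own statement) =====
-- stated objective: idiomatic
-- what changed: Replaced the bounded right-shift loop by a closed-form exponent computed with int.bit_length(), with a direct <32 fast path and a single shift for the mantissa.
import Mathlib
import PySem

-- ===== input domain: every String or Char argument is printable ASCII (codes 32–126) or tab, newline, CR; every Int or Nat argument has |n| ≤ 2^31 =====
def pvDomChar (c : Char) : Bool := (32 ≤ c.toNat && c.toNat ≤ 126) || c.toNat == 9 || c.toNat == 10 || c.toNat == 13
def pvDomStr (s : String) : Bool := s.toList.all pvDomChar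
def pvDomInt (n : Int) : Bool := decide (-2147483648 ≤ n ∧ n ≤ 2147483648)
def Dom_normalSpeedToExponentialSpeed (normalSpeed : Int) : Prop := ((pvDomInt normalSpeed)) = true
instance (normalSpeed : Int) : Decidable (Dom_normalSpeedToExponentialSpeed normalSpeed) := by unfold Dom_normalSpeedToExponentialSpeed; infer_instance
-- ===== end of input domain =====

-- B replaces A's right-shift loop by a closed-form exponent computed from bit_length (idiomatic; no loop).

-- ===== PORT A =====
-- A's 'while True' loop, fuel-bounded: the 'exponent == 7' branch returns by the 8th
-- iteration, so from the entry call (fuel 8, exponent 0) the fuel-0 case is unreachable.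
def pvLoopA : Nat → Int → Int → Int
  | 0, _, _ => 255
  | fuel + 1, mantissa, exponent =>
    if mantissa < 32 then exponent + mantissa * 8
    else if exponent = 7 then 255
    else pvLoopA fuel (PySem.Int.floordiv mantissa 2) (exponent + 1)

def normalSpeedToExponentialSpeed (normalSpeed : Int) : Int :=
  pvLoopA 8 normalSpeed 0

-- ===== PORT B =====
-- n >> exp (exp ≥ 1 here) is ported as floor division by 2^exp; bit_length is PySem.Int.bitLength.
def normalSpeedToExponentialSpeed_alt (normalSpeed : Int) : Int :=
  if normalSpeed < 32 then normalSpeed * 8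
  else
    let exp : Int := (PySem.Int.bitLength normalSpeed : Int) - 5
    if exp > 7 then 255
    else exp + (PySem.Int.floordiv normalSpeed (2 ^ exp.toNat)) * 8

-- ===== PRECONDITION & SPEC =====
def Spec_normalSpeedToExponentialSpeed (normalSpeed : Int) (out : Int) : Prop := out = normalSpeedToExponentialSpeed_alt normalSpeed
instance (normalSpeed : Int) (out : Int) : Decidable (Spec_normalSpeedToExponentialSpeed normalSpeed out) := by unfold Spec_normalSpeedToExponentialSpeed; infer_instance

-- ===== CLAIM (what is proved, stated in full; the proofs are below) =====
def Claim_equal_normalSpeedToExponentialSpeed : Prop := ∀ (normalSpeed : Int), Dom_normalSpeedToExponentialSpeed normalSpeed → Spec_normalSpeedToExponentialSpeed normalSpeed (normalSpeedToExponentialSpeed normalSpeed)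

-- ===== LEMMAS AND PROOFS =====

theorem pv_loop_done (f : Nat) (m e : Int) (h : m < 32) :
    pvLoopA (f + 1) m e = e + m * 8 := by
  simp [pvLoopA, h]

theorem pv_loop_step (f : Nat) (m e : Int) (h : ¬ m < 32) (h7 : e ≠ 7) :
    pvLoopA (f + 1) m e = pvLoopA f (m / 2) (e + 1) := by
  rw [pvLoopA]; simp [h, h7]

theorem pv_loop_stop (f : Nat) (m : Int) (h : ¬ m < 32) :
    pvLoopA (f + 1) m 7 = 255 := by
  rw [pvLoopA]; simp [h]

-- bitLength pinned on the interval [2^k, 2^(k+1))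
theorem pv_bl_eq (n : Int) (k : Nat) (h1 : (2 : Int) ^ k ≤ n) (h2 : n < 2 ^ (k + 1)) :
    PySem.Int.bitLength n = k + 1 := by
  have hc1 : ((2 ^ k : Nat) : Int) ≤ n := by push_cast; exact h1
  have hc2 : n < ((2 ^ (k + 1) : Nat) : Int) := by push_cast; exact h2
  have hk1 : (1 : Nat) ≤ 2 ^ k := Nat.one_le_two_pow
  have hn0 : n ≠ 0 := by omega
  have hub := PySem.Int.lt_two_pow_bitLength n
  have hlb := PySem.Int.two_pow_bitLength_le n hn0
  have hlo : 2 ^ k ≤ n.natAbs := by omega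
  have hhi : n.natAbs < 2 ^ (k + 1) := by omega
  have h3 : k < PySem.Int.bitLength n :=
    (Nat.pow_lt_pow_iff_right (by norm_num)).mp (lt_of_le_of_lt hlo hub)
  have h4 : PySem.Int.bitLength n - 1 < k + 1 :=
    (Nat.pow_lt_pow_iff_right (by norm_num)).mp (lt_of_le_of_lt hlb hhi)
  omega

-- bitLength lower bound from 2^k ≤ n
theorem pv_bl_ge (n : Int) (k : Nat) (h1 : (2 : Int) ^ k ≤ n) :
    k + 1 ≤ PySem.Int.bitLength n := by
  have hc1 : ((2 ^ k : Nat) : Int) ≤ n := by push_cast; exact h1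
  have hk1 : (1 : Nat) ≤ 2 ^ k := Nat.one_le_two_pow
  have hub := PySem.Int.lt_two_pow_bitLength n
  have hlo : 2 ^ k ≤ n.natAbs := by omega
  exact (Nat.pow_lt_pow_iff_right (by norm_num)).mp (lt_of_le_of_lt hlo hub)

theorem pv_main (n : Int) (hlo : -2147483648 ≤ n) (hhi : n ≤ 2147483648) :
    normalSpeedToExponentialSpeed n = normalSpeedToExponentialSpeed_alt n := by
  unfold normalSpeedToExponentialSpeed normalSpeedToExponentialSpeed_alt
  by_cases h32 : n < 32
  · rw [pv_loop_done _ _ _ h32, if_pos h32]; ring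
  · rw [if_neg h32]
    rcases (by omega : (32 ≤ n ∧ n < 64) ∨ (64 ≤ n ∧ n < 128) ∨ (128 ≤ n ∧ n < 256) ∨ (256 ≤ n ∧ n < 512) ∨ (512 ≤ n ∧ n < 1024) ∨ (1024 ≤ n ∧ n < 2048) ∨ (2048 ≤ n ∧ n < 4096) ∨ 4096 ≤ n) with h|h|h|h|h|h|h|h
    · obtain ⟨h1, h2⟩ := h
      rw [pv_bl_eq n 5 (by norm_num; omega) (by norm_num; omega)]
      rw [pv_loop_step _ _ _ (by omega) (by omega),
        pv_loop_done _ _ _ (by omega)]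
      norm_num
    · obtain ⟨h1, h2⟩ := h
      rw [pv_bl_eq n 6 (by norm_num; omega) (by norm_num; omega)]
      rw [pv_loop_step _ _ _ (by omega) (by omega),
        pv_loop_step _ _ _ (by omega) (by omega),
        pv_loop_done _ _ _ (by omega)]
      norm_num [show Int.toNat 2 = 2 from rfl]; omega
    · obtain ⟨h1, h2⟩ := h
      rw [pv_bl_eq n 7 (by norm_num; omega) (by norm_num; omega)]
      rw [pv_loop_step _ _ _ (by omega) (by omega),
        pv_loop_step _ _ _ (by omega) (by omega),
        pv_loop_step _ _ _ (by omega) (by omega),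
        pv_loop_done _ _ _ (by omega)]
      norm_num [show Int.toNat 3 = 3 from rfl]; omega
    · obtain ⟨h1, h2⟩ := h
      rw [pv_bl_eq n 8 (by norm_num; omega) (by norm_num; omega)]
      rw [pv_loop_step _ _ _ (by omega) (by omega),
        pv_loop_step _ _ _ (by omega) (by omega),
        pv_loop_step _ _ _ (by omega) (by omega),
        pv_loop_step _ _ _ (by omega) (by omega),
        pv_loop_done _ _ _ (by omega)]
      norm_num [show Int.toNat 4 = 4 from rfl]; omega
    · obtain ⟨h1, h2⟩ := h
      rw [pv_bl_eq n 9 (by norm_num; omega) (by norm_num; omega)]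
      rw [pv_loop_step _ _ _ (by omega) (by omega),
        pv_loop_step _ _ _ (by omega) (by omega),
        pv_loop_step _ _ _ (by omega) (by omega),
        pv_loop_step _ _ _ (by omega) (by omega),
        pv_loop_step _ _ _ (by omega) (by omega),
        pv_loop_done _ _ _ (by omega)]
      norm_num [show Int.toNat 5 = 5 from rfl]; omega
    · obtain ⟨h1, h2⟩ := h
      rw [pv_bl_eq n 10 (by norm_num; omega) (by norm_num; omega)]
      rw [pv_loop_step _ _ _ (by omega) (by omega),
        pv_loop_step _ _ _ (by omega) (by omega),
        pv_loop_step _ _ _ (by omega) (by omega),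
        pv_loop_step _ _ _ (by omega) (by omega),
        pv_loop_step _ _ _ (by omega) (by omega),
        pv_loop_step _ _ _ (by omega) (by omega),
        pv_loop_done _ _ _ (by omega)]
      norm_num [show Int.toNat 6 = 6 from rfl]; omega
    · obtain ⟨h1, h2⟩ := h
      rw [pv_bl_eq n 11 (by norm_num; omega) (by norm_num; omega)]
      rw [pv_loop_step _ _ _ (by omega) (by omega),
        pv_loop_step _ _ _ (by omega) (by omega),
        pv_loop_step _ _ _ (by omega) (by omega),
        pv_loop_step _ _ _ (by omega) (by omega),
        pv_loop_step _ _ _ (by omega) (by omega),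
        pv_loop_step _ _ _ (by omega) (by omega),
        pv_loop_step _ _ _ (by omega) (by omega),
        pv_loop_done _ _ _ (by omega)]
      norm_num [show Int.toNat 7 = 7 from rfl]; omega
    · have hbl := pv_bl_ge n 12 (by norm_num; omega)
      rw [pv_loop_step _ _ _ (by omega) (by omega),
        pv_loop_step _ _ _ (by omega) (by omega),
        pv_loop_step _ _ _ (by omega) (by omega),
        pv_loop_step _ _ _ (by omega) (by omega),
        pv_loop_step _ _ _ (by omega) (by omega),
        pv_loop_step _ _ _ (by omega) (by omega),
        pv_loop_step _ _ _ (by omega) (by omega)]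
      norm_num
      rw [pv_loop_stop _ _ (by omega)]
      split_ifs <;> omega

-- ===== VERDICT (by name: the statement is the Claim_ definition above) =====
theorem normalSpeedToExponentialSpeed_spec : Claim_equal_normalSpeedToExponentialSpeed := by
  intro n hd
  have h : -2147483648 ≤ n ∧ n ≤ 2147483648 := by
    simpa [Dom_normalSpeedToExponentialSpeed, pvDomInt] using hd
  exact pv_main n h.1 h.2
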